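-- pv_equiv track=rewrite | github.com/mangdangroboticsclub/apps-md-robots | ai-app/ai_app.py | cut_text_by_last_period
-- ===== SOURCE A (Python) =====
-- def cut_text_by_last_period(text, max_words_before_period=15):
--     # UNCHANGED: Text processing utilities remain the same
--     words = text.split()
--     last_period_index = -1
--     for i, word in enumerate(words[:max_words_before_period]):
--         if '.' in word:
--             last_period_index = i
--     if last_period_index != -1:
--         return ' '.join(words[:last_period_index+1])
--     first_period_index = -1
--     for i, word in enumerate(words):
--         if '.' in word:
--             first_period_index = i
--             break
--     return ' '.join(words[:first_period_index+1]) if first_period_index != -1 else text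
-- ===== SOURCE B (Python) =====
-- def cut_text_by_last_period(text, max_words_before_period=15):
--     words = text.split()
--     prefix_len = len(words[:max_words_before_period])
--     first_period_index = -1
--     last_period_index = -1
--     for i, word in enumerate(words):
--         if '.' in word:
--             if first_period_index == -1:
--                 first_period_index = i
--             if i < prefix_len:
--                 last_period_index = i
--     if last_period_index != -1:
--         return ' '.join(words[:last_period_index + 1])
--     if first_period_index != -1:
--         return ' '.join(words[:first_period_index + 1])
--     return text
-- ===== Notes on version B (the rewrite author's own statement) =====
-- stated objective: simpler
-- what changed: Replaces A's two sequential scans (a slice-bounded last-period scan, then a separate break-on-first scan over all words) with a single pass over all words that tracks both the first period index and the prefix-gated last period index at once.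
import Mathlib
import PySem

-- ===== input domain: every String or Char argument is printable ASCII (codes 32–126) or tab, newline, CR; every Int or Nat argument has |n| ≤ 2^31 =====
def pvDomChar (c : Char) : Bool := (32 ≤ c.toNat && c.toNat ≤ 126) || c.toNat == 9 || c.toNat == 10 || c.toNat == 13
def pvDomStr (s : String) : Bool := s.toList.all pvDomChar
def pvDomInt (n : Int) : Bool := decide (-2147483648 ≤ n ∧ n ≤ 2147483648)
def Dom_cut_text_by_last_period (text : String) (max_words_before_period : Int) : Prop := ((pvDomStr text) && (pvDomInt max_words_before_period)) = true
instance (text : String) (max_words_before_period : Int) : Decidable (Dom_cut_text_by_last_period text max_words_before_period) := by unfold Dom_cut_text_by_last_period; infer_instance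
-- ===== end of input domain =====

-- B replaces A's two sequential scans by one pass tracking first and last period indices (objective: simpler decomposition, same cost).


-- ===== PORT A =====
-- the 'for i, word in enumerate(words): if '.' in word: first_period_index = i; break' loop
def pvFirstPeriod (ws : List String) (i : Int) : Int :=
  match ws with
  | [] => -1
  | w :: rest => if PySem.Str.isIn "." w then i else pvFirstPeriod rest (i + 1)

def cut_text_by_last_period (text : String) (max_words_before_period : Int) : String :=
  let words := PySem.Str.split₀ text
  let last_period_index : Int :=
    (PySem.List.enumerate (PySem.List.slice words none (some max_words_before_period)) 0).foldl
      (fun acc p => if PySem.Str.isIn "." p.2 then p.1 else acc) (-1)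
  if last_period_index ≠ -1 then
    PySem.Str.join " " (PySem.List.slice words none (some (last_period_index + 1)))
  else
    let first_period_index : Int := pvFirstPeriod words 0
    if first_period_index ≠ -1 then
      PySem.Str.join " " (PySem.List.slice words none (some (first_period_index + 1)))
    else text

-- ===== PORT B =====
def cut_text_by_last_period_alt (text : String) (max_words_before_period : Int) : String :=
  let words := PySem.Str.split₀ text
  let prefix_len : Int := (PySem.List.slice words none (some max_words_before_period)).length
  let fl : Int × Int :=
    (PySem.List.enumerate words 0).foldl
      (fun s p =>
        if PySem.Str.isIn "." p.2 then
          ((if s.1 = -1 then p.1 else s.1), (if p.1 < prefix_len then p.1 else s.2))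
        else s)
      (-1, -1)
  if fl.2 ≠ -1 then
    PySem.Str.join " " (PySem.List.slice words none (some (fl.2 + 1)))
  else if fl.1 ≠ -1 then
    PySem.Str.join " " (PySem.List.slice words none (some (fl.1 + 1)))
  else text

-- ===== PRECONDITION & SPEC =====
def Spec_cut_text_by_last_period (text : String) (max_words_before_period : Int) (out : String) : Prop := out = cut_text_by_last_period_alt text max_words_before_period
instance (text : String) (max_words_before_period : Int) (out : String) : Decidable (Spec_cut_text_by_last_period text max_words_before_period out) := by unfold Spec_cut_text_by_last_period; infer_instance

-- ===== CLAIM (what is proved, stated in full; the proofs are below) =====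
def Claim_equal_cut_text_by_last_period : Prop := ∀ (text : String) (max_words_before_period : Int), Dom_cut_text_by_last_period text max_words_before_period → Spec_cut_text_by_last_period text max_words_before_period (cut_text_by_last_period text max_words_before_period)

-- ===== LEMMAS AND PROOFS =====

-- the first-component fold keeps a non-(-1) accumulator
theorem pv_first_fold_stay (ws : List String) (k a : Int) (ha : a ≠ -1) :
    (PySem.List.enumerate ws k).foldl
      (fun a p => if PySem.Str.isIn "." p.2 then (if a = -1 then p.1 else a) else a) a = a := by
  induction ws generalizing k with
  | nil => rfl
  | cons w rest ih =>
      simp only [PySem.List.enumerate_cons, List.foldl_cons]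
      by_cases h : PySem.Str.isIn "." w = true
      · rw [if_pos h, if_neg ha]; exact ih (k + 1)
      · rw [if_neg h]; exact ih (k + 1)

-- the first-component fold from -1 computes A's break loop
theorem pv_first_fold (ws : List String) (k : Int) (hk : 0 ≤ k) :
    (PySem.List.enumerate ws k).foldl
      (fun a p => if PySem.Str.isIn "." p.2 then (if a = -1 then p.1 else a) else a) (-1)
      = pvFirstPeriod ws k := by
  induction ws generalizing k with
  | nil => rfl
  | cons w rest ih =>
      simp only [PySem.List.enumerate_cons, List.foldl_cons, pvFirstPeriod]
      by_cases h : PySem.Str.isIn "." w = true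
      · rw [if_pos h, if_pos h]
        simp only [if_true]
        exact pv_first_fold_stay rest (k + 1) k (by omega)
      · rw [if_neg h, if_neg h]
        exact ih (k + 1) (by omega)

-- once the index reaches the bound, the gated last-component fold is constant
theorem pv_last_fold_stay (ws : List String) (k P a : Int) (h : P ≤ k) :
    (PySem.List.enumerate ws k).foldl
      (fun a p => if PySem.Str.isIn "." p.2 then (if p.1 < P then p.1 else a) else a) a = a := by
  induction ws generalizing k a with
  | nil => rfl
  | cons w rest ih =>
      simp only [PySem.List.enumerate_cons, List.foldl_cons]
      by_cases hw : PySem.Str.isIn "." w = true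
      · rw [if_pos hw, if_neg (by omega : ¬ k < P)]; exact ih _ _ (by omega)
      · rw [if_neg hw]; exact ih _ _ (by omega)

-- the gated last-component fold over the whole list is A's fold over the prefix
theorem pv_last_fold (ws : List String) (k P a : Int) (hk : 0 ≤ k) :
    (PySem.List.enumerate ws k).foldl
      (fun a p => if PySem.Str.isIn "." p.2 then (if p.1 < P then p.1 else a) else a) a
      = (PySem.List.enumerate (ws.take (P - k).toNat) k).foldl
          (fun a p => if PySem.Str.isIn "." p.2 then p.1 else a) a := by
  induction ws generalizing k a with
  | nil => simp [List.take_nil]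
  | cons w rest ih =>
      by_cases hkP : k < P
      · have ht : (P - k).toNat = (P - (k + 1)).toNat + 1 := by omega
        rw [ht]
        simp only [List.take_succ_cons, PySem.List.enumerate_cons, List.foldl_cons]
        by_cases hw : PySem.Str.isIn "." w = true
        · rw [if_pos hw, if_pos hw, if_pos hkP]; exact ih _ _ (by omega)
        · rw [if_neg hw, if_neg hw]; exact ih _ _ (by omega)
      · have ht : (P - k).toNat = 0 := by omega
        rw [ht]
        simp only [List.take_zero, PySem.List.enumerate_nil, List.foldl_nil]
        exact pv_last_fold_stay (w :: rest) k P a (by omega)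

-- words[:m] is a prefix of words
theorem pv_slice_to_eq_take (xs : List String) (b : Int) :
    ∃ n : Nat, PySem.List.slice xs none (some b) = xs.take n := by
  cases b with
  | ofNat a => exact ⟨a, PySem.List.slice_to_natCast xs a⟩
  | negSucc m =>
      refine ⟨xs.length - (m + 1), ?_⟩
      have h := PySem.List.slice_to_neg_natCast xs (m + 1) (by omega)
      rw [show (Int.negSucc m) = -(((m + 1 : Nat) : Int)) from by omega]
      exact h

-- B's paired fold splits into the two component folds
theorem pv_pair_fold (ws : List String) (P : Int) :
    (PySem.List.enumerate ws 0).foldl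
      (fun (s : Int × Int) p =>
        if PySem.Str.isIn "." p.2 then
          ((if s.1 = -1 then p.1 else s.1), (if p.1 < P then p.1 else s.2))
        else s)
      (-1, -1)
      = ((PySem.List.enumerate ws 0).foldl
          (fun a p => if PySem.Str.isIn "." p.2 then (if a = -1 then p.1 else a) else a) (-1),
         (PySem.List.enumerate ws 0).foldl
          (fun a p => if PySem.Str.isIn "." p.2 then (if p.1 < P then p.1 else a) else a) (-1)) := by
  have hstep :
      (fun (s : Int × Int) (p : Int × String) =>
        if PySem.Str.isIn "." p.2 then
          ((if s.1 = -1 then p.1 else s.1), (if p.1 < P then p.1 else s.2))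
        else s)
      = fun (s : Int × Int) (p : Int × String) =>
          ((if PySem.Str.isIn "." p.2 then (if s.1 = -1 then p.1 else s.1) else s.1),
           (if PySem.Str.isIn "." p.2 then (if p.1 < P then p.1 else s.2) else s.2)) := by
    funext s p; split <;> rfl
  rw [hstep]
  exact PySem.List.foldl_prod_mk
    (f := fun (a : Int) (p : Int × String) =>
      if PySem.Str.isIn "." p.2 then (if a = -1 then p.1 else a) else a)
    (g := fun (a : Int) (p : Int × String) =>
      if PySem.Str.isIn "." p.2 then (if p.1 < P then p.1 else a) else a)
    _ _ _

-- ===== VERDICT (by name: the statement is the Claim_ definition above) =====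
theorem cut_text_by_last_period_spec : Claim_equal_cut_text_by_last_period := by
  intro text m _
  unfold Spec_cut_text_by_last_period
  simp only [cut_text_by_last_period, cut_text_by_last_period_alt]
  set words := PySem.Str.split₀ text with hwords
  set P : Int := ((PySem.List.slice words none (some m)).length : Int) with hP
  obtain ⟨n, hn⟩ := pv_slice_to_eq_take words m
  rw [pv_pair_fold]
  rw [pv_last_fold words 0 P (-1) le_rfl, pv_first_fold words 0 le_rfl]
  have htoNat : (P - 0).toNat = min n words.length := by
    rw [hP, hn, List.length_take]; omega
  have htake : words.take ((P - 0).toNat) = PySem.List.slice words none (some m) := by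
    rw [htoNat, hn]
    by_cases hle : n ≤ words.length
    · rw [Nat.min_eq_left hle]
    · rw [Nat.min_eq_right (by omega), List.take_length,
        List.take_of_length_le (by omega)]
  rw [htake]
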